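-- pv_equiv track=rewrite | github.com/spac-null/disability-ai-collective | disability_discovery_crawler_real.py | suggest_agent
-- ===== SOURCE A (Python) =====
-- def suggest_agent(finding):
--     """Suggest which agent should write about this"""
--     keywords = finding['keywords']
--
--     if any(k in keywords for k in ['deaf', 'blind', 'sensory', 'visual', 'hearing']):
--         return 'Pixel Nova or Siri Sage'
--     elif any(k in keywords for k in ['neurodiverse', 'autistic', 'adhd', 'cognitive']):
--         return 'Zen Circuit'
--     elif any(k in keywords for k in ['accessibility', 'mobility', 'wheelchair', 'barrier']):
--         return 'Maya Flux'
--     else: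
--         return 'Any agent'
-- ===== SOURCE B (Python) =====
-- # Inverted index: map each trigger keyword to its rule priority, take the
-- # minimum priority over the finding's keywords in one pass.
-- PRIORITY = {
--     'deaf': 0, 'blind': 0, 'sensory': 0, 'visual': 0, 'hearing': 0,
--     'neurodiverse': 1, 'autistic': 1, 'adhd': 1, 'cognitive': 1,
--     'accessibility': 2, 'mobility': 2, 'wheelchair': 2, 'barrier': 2,
-- }
-- AGENTS = ['Pixel Nova or Siri Sage', 'Zen Circuit', 'Maya Flux', 'Any agent']
--
--
-- def suggest_agent(finding):
--     """Suggest which agent should write about this"""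
--     best = 3
--     for k in finding['keywords']:
--         p = PRIORITY.get(k, 3)
--         if p < best:
--             best = p
--     return AGENTS[best]
-- ===== Notes on version B (the rewrite author's own statement) =====
-- stated objective: alternative
-- what changed: Instead of testing each rule's keyword group against the list, B builds an inverted keyword-to-priority index and makes one pass over the finding's keywords keeping the minimum priority, indexing into the agent table at the end.
import Mathlib
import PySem

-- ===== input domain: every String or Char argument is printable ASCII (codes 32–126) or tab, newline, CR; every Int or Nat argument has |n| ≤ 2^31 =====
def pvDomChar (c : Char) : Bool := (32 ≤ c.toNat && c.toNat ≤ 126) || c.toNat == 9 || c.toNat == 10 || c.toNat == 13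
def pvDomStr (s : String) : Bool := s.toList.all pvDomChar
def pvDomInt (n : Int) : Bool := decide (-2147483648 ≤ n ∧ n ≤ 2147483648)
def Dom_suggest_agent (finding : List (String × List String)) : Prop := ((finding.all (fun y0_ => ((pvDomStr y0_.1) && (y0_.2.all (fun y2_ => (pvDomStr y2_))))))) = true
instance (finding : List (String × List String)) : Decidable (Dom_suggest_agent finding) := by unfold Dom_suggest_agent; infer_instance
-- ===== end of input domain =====

-- B replaces A's if-elif group scan by an inverted keyword→priority index with one min-pass over the finding's keywords (alternative; same cost class).


-- ===== PORT A =====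
-- finding['keywords'] = first-match assoc-list lookup (exact for the dict convention); none = KeyError, excluded by Pre_.
def suggest_agent (finding : List (String × List String)) : String :=
  match finding.lookup "keywords" with
  | none => ""   -- unreachable under Pre_ (Python raises KeyError)
  | some keywords =>
    if ["deaf", "blind", "sensory", "visual", "hearing"].any (fun k => keywords.contains k) then
      "Pixel Nova or Siri Sage"
    else if ["neurodiverse", "autistic", "adhd", "cognitive"].any (fun k => keywords.contains k) then
      "Zen Circuit"
    else if ["accessibility", "mobility", "wheelchair", "barrier"].any (fun k => keywords.contains k) then
      "Maya Flux"
    else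
      "Any agent"

-- ===== PORT B =====
def prioDict : PySem.Dict String Nat := PySem.Dict.ofList
  [("deaf", 0), ("blind", 0), ("sensory", 0), ("visual", 0), ("hearing", 0),
   ("neurodiverse", 1), ("autistic", 1), ("adhd", 1), ("cognitive", 1),
   ("accessibility", 2), ("mobility", 2), ("wheelchair", 2), ("barrier", 2)]

def agentsTable : List String :=
  ["Pixel Nova or Siri Sage", "Zen Circuit", "Maya Flux", "Any agent"]

def suggest_agent_alt (finding : List (String × List String)) : String :=
  match finding.lookup "keywords" with
  | none => ""   -- unreachable under Pre_
  | some keywords =>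
    let best := keywords.foldl
      (fun best k =>
        let p := PySem.Dict.getD prioDict k 3
        if p < best then p else best) 3
    agentsTable.getD best ""   -- AGENTS[best]; best ≤ 3 always, so in range like Python

-- ===== PRECONDITION & SPEC =====
-- Pre_: the finding has a 'keywords' entry; otherwise Python A raises KeyError.
def Pre_suggest_agent (finding : List (String × List String)) : Prop :=
  (finding.lookup "keywords").isSome = true
instance (finding : List (String × List String)) : Decidable (Pre_suggest_agent finding) := by
  unfold Pre_suggest_agent; infer_instance

def pvWitness_suggest_agent : (List (String × List String)) := [("keywords", ["deaf"])]

def Spec_suggest_agent (finding : List (String × List String)) (out : String) : Prop := out = suggest_agent_alt finding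
instance (finding : List (String × List String)) (out : String) : Decidable (Spec_suggest_agent finding out) := by unfold Spec_suggest_agent; infer_instance

-- ===== CLAIM (what is proved, stated in full; the proofs are below) =====
def Claim_equal_suggest_agent : Prop := ∀ (finding : List (String × List String)), Dom_suggest_agent finding → Pre_suggest_agent finding → Spec_suggest_agent finding (suggest_agent finding)

-- ===== LEMMAS AND PROOFS =====
-- keyword priority as a plain if-chain
def prioFn (k : String) : Nat :=
  if ["deaf", "blind", "sensory", "visual", "hearing"].contains k then 0
  else if ["neurodiverse", "autistic", "adhd", "cognitive"].contains k then 1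
  else if ["accessibility", "mobility", "wheelchair", "barrier"].contains k then 2
  else 3

theorem prioDict_mk : prioDict = PySem.Dict.mk
    [("deaf", 0), ("blind", 0), ("sensory", 0), ("visual", 0), ("hearing", 0),
     ("neurodiverse", 1), ("autistic", 1), ("adhd", 1), ("cognitive", 1),
     ("accessibility", 2), ("mobility", 2), ("wheelchair", 2), ("barrier", 2)] := by decide

theorem getD_prioDict (k : String) : PySem.Dict.getD prioDict k 3 = prioFn k := by
  by_cases h : k ∈ (["deaf", "blind", "sensory", "visual", "hearing", "neurodiverse",
      "autistic", "adhd", "cognitive", "accessibility", "mobility", "wheelchair",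
      "barrier"] : List String)
  · simp only [List.mem_cons, List.not_mem_nil, or_false] at h
    rcases h with rfl|rfl|rfl|rfl|rfl|rfl|rfl|rfl|rfl|rfl|rfl|rfl|rfl <;> decide
  · simp only [List.mem_cons, List.not_mem_nil, or_false, not_or] at h
    obtain ⟨h1, h2, h3, h4, h5, h6, h7, h8, h9, h10, h11, h12, h13⟩ := h
    rw [prioDict_mk]
    simp [PySem.Dict.getD, PySem.Dict.get?, prioFn,
      List.contains_eq_mem, Ne.symm h1, Ne.symm h2, Ne.symm h3, Ne.symm h4, Ne.symm h5, Ne.symm h6, Ne.symm h7, Ne.symm h8, Ne.symm h9, Ne.symm h10, Ne.symm h11, Ne.symm h12, Ne.symm h13, h1, h2, h3, h4, h5, h6, h7, h8, h9, h10, h11, h12, h13]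

theorem prio_cases (k : String) :
    prioFn k = 0 ∨ prioFn k = 1 ∨ prioFn k = 2 ∨ prioFn k = 3 := by
  unfold prioFn; split_ifs <;> simp

-- the fold is the same as folding with min
theorem fold_min (keywords : List String) (b : Nat) :
    keywords.foldl (fun best k =>
        let p := PySem.Dict.getD prioDict k 3
        if p < best then p else best) b
      = keywords.foldl (fun best k => min (prioFn k) best) b := by
  induction keywords generalizing b with
  | nil => rfl
  | cons k rest ih =>
    rw [List.foldl_cons, List.foldl_cons,
      show (let p := PySem.Dict.getD prioDict k 3; if p < b then p else b)
          = min (prioFn k) b by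
        simp only [getD_prioDict]
        rcases Nat.lt_or_ge (prioFn k) b with h | h <;> simp [h, Nat.min_def] <;> omega]
    exact ih _

theorem fold_min_acc (keywords : List String) (a b : Nat) :
    keywords.foldl (fun best k => min (prioFn k) best) (min a b)
      = min a (keywords.foldl (fun best k => min (prioFn k) best) b) := by
  induction keywords generalizing b with
  | nil => rfl
  | cons k rest ih =>
    simp only [List.foldl_cons]
    rw [show min (prioFn k) (min a b) = min a (min (prioFn k) b) by omega, ih]

-- characterise the fold result as the first-matching-priority index
theorem fold_min_eq (keywords : List String) :
    keywords.foldl (fun best k => min (prioFn k) best) 3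
      = (if keywords.any (fun k => prioFn k = 0) then 0
         else if keywords.any (fun k => prioFn k ≤ 1) then 1
         else if keywords.any (fun k => prioFn k ≤ 2) then 2
         else 3) := by
  induction keywords with
  | nil => rfl
  | cons k rest ih =>
    rw [List.foldl_cons, fold_min_acc, ih]
    simp only [List.any_cons]
    rcases prio_cases k with h | h | h | h <;> simp only [h] <;> simp <;> split_ifs <;> omega

theorem any_comm (g keywords : List String) :
    g.any (fun k => keywords.contains k) = keywords.any (fun k => g.contains k) := by
  rw [Bool.eq_iff_iff]
  simp only [List.any_eq_true, List.contains_eq_mem, decide_eq_true_eq]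
  exact ⟨fun ⟨x, h1, h2⟩ => ⟨x, h2, h1⟩, fun ⟨x, h1, h2⟩ => ⟨x, h2, h1⟩⟩

theorem any_orb (l : List String) (f g : String → Bool) :
    (l.any fun x => f x || g x) = (l.any f || l.any g) := by
  induction l with
  | nil => rfl
  | cons x xs ih => cases hf : f x <;> cases hg : g x <;> simp [List.any_cons, hf, hg, ih]

theorem prio0 (k : String) :
    decide (prioFn k = 0) = ["deaf", "blind", "sensory", "visual", "hearing"].contains k := by
  unfold prioFn; split_ifs <;> simp_all

theorem prio1 (k : String) :
    decide (prioFn k ≤ 1)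
      = (["deaf", "blind", "sensory", "visual", "hearing"].contains k
         || ["neurodiverse", "autistic", "adhd", "cognitive"].contains k) := by
  unfold prioFn; split_ifs <;> simp_all

theorem prio2 (k : String) :
    decide (prioFn k ≤ 2)
      = (["deaf", "blind", "sensory", "visual", "hearing"].contains k
         || (["neurodiverse", "autistic", "adhd", "cognitive"].contains k
             || ["accessibility", "mobility", "wheelchair", "barrier"].contains k)) := by
  unfold prioFn; split_ifs <;> simp_all

-- ===== VERDICT (by name: the statement is the Claim_ definition above) =====
theorem suggest_agent_spec : Claim_equal_suggest_agent := by
  intro finding _ _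
  unfold Spec_suggest_agent suggest_agent suggest_agent_alt
  cases finding.lookup "keywords" with
  | none => rfl
  | some keywords =>
    simp only [fold_min, fold_min_eq, prio0, prio1, prio2, any_orb,
      any_comm _ keywords, agentsTable]
    by_cases a1 : (keywords.any fun k =>
        (["deaf", "blind", "sensory", "visual", "hearing"] : List String).contains k) = true <;>
    by_cases a2 : (keywords.any fun k =>
        (["neurodiverse", "autistic", "adhd", "cognitive"] : List String).contains k) = true <;>
    by_cases a3 : (keywords.any fun k =>
        (["accessibility", "mobility", "wheelchair", "barrier"] : List String).contains k) = true <;>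
      (simp only [a1, a2, a3]) <;> simp
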